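-- pv_equiv track=rewrite | github.com/mhadifilms/trailerdb | scripts/group_trailers.py | pick_canonical_title
-- ===== SOURCE A (Python) =====
-- def pick_canonical_title(group: list[dict]) -> str:
--     english = [t for t in group if (t.get("language") or "").startswith("en")]
--     if english:
--         return english[0]["title"] or "Untitled"
--     for t in group:
--         if t.get("title"):
--             return t["title"]
--     return "Untitled"
-- ===== SOURCE B (Python) =====
-- def pick_canonical_title(group: list[dict]) -> str:
--     first_english = None
--     first_title = None
--     for t in group:
--         if first_english is None and (t.get("language") or "").startswith("en"):
--             first_english = t
--         if first_title is None and t.get("title"):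
--             first_title = t["title"]
--     if first_english is not None:
--         return first_english["title"] or "Untitled"
--     return first_title or "Untitled"
-- ===== Notes on version B (the rewrite author's own statement) =====
-- stated objective: alternative
-- what changed: Replaced the filter-comprehension plus separate fallback loop with a single pass over group that latches the first English entry and the first truthy title in two sentinels, deciding the result after the loop.
import Mathlib
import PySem

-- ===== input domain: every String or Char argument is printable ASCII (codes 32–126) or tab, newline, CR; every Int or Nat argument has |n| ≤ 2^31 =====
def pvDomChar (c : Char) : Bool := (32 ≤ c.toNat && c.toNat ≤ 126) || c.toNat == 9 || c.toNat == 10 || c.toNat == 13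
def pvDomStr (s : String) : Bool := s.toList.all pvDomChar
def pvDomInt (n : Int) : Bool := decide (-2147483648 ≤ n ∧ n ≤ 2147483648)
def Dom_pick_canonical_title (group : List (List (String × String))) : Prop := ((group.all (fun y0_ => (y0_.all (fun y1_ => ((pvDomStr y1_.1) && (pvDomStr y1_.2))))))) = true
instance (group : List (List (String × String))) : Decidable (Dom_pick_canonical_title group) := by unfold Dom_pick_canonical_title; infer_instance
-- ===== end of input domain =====

-- B does one pass with two latched sentinels instead of A's filter comprehension plus a second
-- fallback loop; same result on all inputs where A returns (Pre_ excludes A's KeyError inputs).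

-- ===== PORT A =====
-- dict lookup t.get(k): first match in the association list (exact: PySem.Dict.get?)
def pctGet (t : List (String × String)) (k : String) : Option String :=
  (PySem.Dict.mk t).get? k

-- (t.get("language") or "").startswith("en")
def pctIsEng (t : List (String × String)) : Bool :=
  PySem.Str.startswith ((pctGet t "language").getD "") "en"

-- the fallback 'for t in group: if t.get("title"): return t["title"]' / 'return "Untitled"'
def pctFallback : List (List (String × String)) → String
  | [] => "Untitled"
  | t :: rest =>
      if ((pctGet t "title").getD "") ≠ "" then (pctGet t "title").getD ""
      else pctFallback rest

def pick_canonical_title (group : List (List (String × String))) : String :=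
  let english := group.filter pctIsEng
  match english with
  | t :: _ =>
      -- english[0]["title"] or "Untitled"; KeyError (missing "title") is excluded by Pre_
      match pctGet t "title" with
      | some s => if s = "" then "Untitled" else s
      | none => ""
  | [] => pctFallback group

-- ===== PORT B =====
-- the single loop: latches first_english and first_title
def pctLoop : List (List (String × String)) → Option (List (String × String)) → Option String →
    Option (List (String × String)) × Option String
  | [], fe, ft => (fe, ft)
  | t :: rest, fe, ft =>
      let fe' := if fe.isNone && pctIsEng t then some t else fe
      let ft' := if ft.isNone && ((pctGet t "title").getD "") ≠ "" then
                   some ((pctGet t "title").getD "") else ft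
      pctLoop rest fe' ft'

def pick_canonical_title_alt (group : List (List (String × String))) : String :=
  let r := pctLoop group none none
  match r.1 with
  | some t =>
      -- first_english["title"] or "Untitled"; KeyError excluded by Pre_
      match pctGet t "title" with
      | some s => if s = "" then "Untitled" else s
      | none => ""
  | none =>
      match r.2 with
      | some s => s
      | none => "Untitled"

-- ===== PRECONDITION & SPEC =====
-- Pre_ excludes exactly the inputs on which A raises KeyError: a first English entry with no
-- "title" key (B raises the same KeyError there).
def Pre_pick_canonical_title (group : List (List (String × String))) : Prop :=
  (Option.all (fun t => (pctGet t "title").isSome) (group.find? pctIsEng)) = true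
instance (group : List (List (String × String))) : Decidable (Pre_pick_canonical_title group) := by
  unfold Pre_pick_canonical_title; infer_instance

def pvWitness_pick_canonical_title : (List (List (String × String))) :=
  [[("language", "fr"), ("title", "Bande")], [("language", "en-US"), ("title", "Trailer")]]

def Spec_pick_canonical_title (group : List (List (String × String))) (out : String) : Prop := out = pick_canonical_title_alt group
instance (group : List (List (String × String))) (out : String) : Decidable (Spec_pick_canonical_title group out) := by unfold Spec_pick_canonical_title; infer_instance

-- ===== CLAIM (what is proved, stated in full; the proofs are below) =====
def Claim_equal_pick_canonical_title : Prop := ∀ (group : List (List (String × String))), Dom_pick_canonical_title group → Pre_pick_canonical_title group → Spec_pick_canonical_title group (pick_canonical_title group)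

-- ===== LEMMAS AND PROOFS =====

-- the loop's two sentinels are "first match", i.e. accumulator-or-find
theorem pctLoop_spec (ts : List (List (String × String)))
    (fe : Option (List (String × String))) (ft : Option String) :
    pctLoop ts fe ft =
      (fe.or (ts.find? pctIsEng),
       ft.or ((ts.find? (fun t => ((pctGet t "title").getD "") ≠ "")).map
               (fun t => (pctGet t "title").getD ""))) := by
  induction ts generalizing fe ft with
  | nil => simp [pctLoop]
  | cons t rest ih =>
      simp only [pctLoop, ih, List.find?]
      cases fe <;> cases ft <;>
        by_cases h1 : pctIsEng t = true <;>
        by_cases h2 : ((pctGet t "title").getD "") ≠ "" <;>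
        simp_all [Option.or]

theorem head?_filter_eq_find? (p : List (String × String) → Bool)
    (l : List (List (String × String))) : (l.filter p).head? = l.find? p := by
  induction l with
  | nil => simp
  | cons t rest ih =>
      by_cases h : p t = true <;> simp [List.filter, List.find?, h, ih]

theorem pctFallback_eq (l : List (List (String × String))) :
    pctFallback l =
      match (l.find? (fun t => ((pctGet t "title").getD "") ≠ "")).map
              (fun t => (pctGet t "title").getD "") with
      | some s => s
      | none => "Untitled" := by
  induction l with
  | nil => simp [pctFallback]
  | cons t rest ih =>
      by_cases h : ((pctGet t "title").getD "") ≠ "" <;>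
        simp [pctFallback, List.find?, h, ih]

-- ===== VERDICT (by name: the statement is the Claim_ definition above) =====
theorem pick_canonical_title_spec : Claim_equal_pick_canonical_title := by
  intro group _hdom _hpre
  unfold Spec_pick_canonical_title pick_canonical_title pick_canonical_title_alt
  rw [pctLoop_spec]
  simp only [Option.none_or]
  rcases hfind : group.find? pctIsEng with _ | t
  · have hfil : group.filter pctIsEng = [] := by
      have := head?_filter_eq_find? pctIsEng group
      rw [hfind] at this
      exact List.head?_eq_none_iff.mp this
    simp only [hfil]
    rw [pctFallback_eq]
  · have hfil : (group.filter pctIsEng).head? = some t := by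
      rw [head?_filter_eq_find?, hfind]
    rcases hfil2 : group.filter pctIsEng with _ | ⟨t', rest⟩
    · simp [hfil2] at hfil
    · rw [hfil2] at hfil
      simp only [List.head?] at hfil
      injection hfil with h
      subst h
      simp
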